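-- pv_equiv track=rewrite | github.com/xiayiLL/- | arithmetic.py | zhongToList
-- ===== SOURCE A (Python) =====
-- def zhongToList(str = ''): #中缀表达式字符串转换为列表
--     i = 0
--     numStr = ''
--     flag = False
--     numList = []
--     while i < len(str):
--         if(str[i].isdigit()):
--             numStr += str[i]
--             flag = True
--         else:
--             if(flag):
--                 numList.append(numStr)
--                 numStr = ''
--                 flag = False
--             numList.append(str[i])
--         i += 1
--     if(flag):
--         numList.append(numStr)
--     return numList
-- ===== SOURCE B (Python) =====
-- def zhongToList(str = ''):  # run-scanning tokenizer: scan whole digit runs at once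
--     out = []
--     i = 0
--     n = len(str)
--     while i < n:
--         if str[i].isdigit():
--             j = i
--             while j < n and str[j].isdigit():
--                 j += 1
--             out.append(str[i:j])
--             i = j
--         else:
--             out.append(str[i])
--             i += 1
--     return out
-- ===== Notes on version B (the rewrite author's own statement) =====
-- stated objective: alternative
-- what changed: Replaces A's character-by-character flag/numStr state machine with a run-scanning tokenizer that, on a digit, scans the whole maximal digit run at once and appends the slice, so no accumulator string or pending-flush flag exists.
import Mathlib
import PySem

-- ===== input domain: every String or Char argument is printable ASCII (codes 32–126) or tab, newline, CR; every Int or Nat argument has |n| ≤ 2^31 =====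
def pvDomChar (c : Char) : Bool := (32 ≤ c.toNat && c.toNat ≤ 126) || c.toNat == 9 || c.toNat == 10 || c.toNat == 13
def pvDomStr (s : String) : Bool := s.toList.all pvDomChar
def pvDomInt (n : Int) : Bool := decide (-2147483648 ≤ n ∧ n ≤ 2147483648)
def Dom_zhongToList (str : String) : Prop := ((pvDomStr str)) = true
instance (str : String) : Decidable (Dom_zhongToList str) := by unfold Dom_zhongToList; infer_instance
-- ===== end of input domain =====

-- B replaces A's flag/numStr state machine with a run-scanning tokenizer (alternative decomposition, same cost).


-- ===== PORT A =====
-- A's while loop over the characters, carrying numStr / flag / numList exactly as the Python does.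
def zhongALoop : List Char → String → Bool → List String → List String
  | [], numStr, flag, numList => if flag then numList ++ [numStr] else numList
  | c :: cs, numStr, flag, numList =>
    if PySem.Chars.isdigit c then
      zhongALoop cs (numStr.push c) true numList
    else
      zhongALoop cs "" false ((if flag then numList ++ [numStr] else numList) ++ [String.ofList [c]])

def zhongToList (str : String) : List String :=
  zhongALoop str.toList "" false []

-- ===== PORT B =====
-- Source B's run scanner: on a digit, the inner while computes the maximal digit run (str[i:j])
-- = takeWhile/dropWhile on the remaining characters; otherwise the single character is emitted.
def zhongBTok : List Char → List String
  | [] => []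
  | c :: cs =>
    if PySem.Chars.isdigit c then
      String.ofList (c :: cs.takeWhile PySem.Chars.isdigit) :: zhongBTok (cs.dropWhile PySem.Chars.isdigit)
    else
      String.ofList [c] :: zhongBTok cs
termination_by l => l.length
decreasing_by
  · have := List.length_dropWhile_le (p := PySem.Chars.isdigit) (l := cs)
    simp; omega
  · simp

def zhongToList_alt (str : String) : List String :=
  zhongBTok str.toList

-- ===== PRECONDITION & SPEC =====
def Spec_zhongToList (str : String) (out : List String) : Prop := out = zhongToList_alt str
instance (str : String) (out : List String) : Decidable (Spec_zhongToList str out) := by unfold Spec_zhongToList; infer_instance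

-- ===== CLAIM (what is proved, stated in full; the proofs are below) =====
def Claim_equal_zhongToList : Prop := ∀ (str : String), Dom_zhongToList str → Spec_zhongToList str (zhongToList str)

-- ===== LEMMAS AND PROOFS =====

theorem pv_mk_push (l : List Char) (c : Char) : (String.ofList l).push c = String.ofList (l ++ [c]) := by
  apply String.toList_inj.mp
  simp

-- Joint loop invariant: with an empty pending number A's loop appends B's tokens; with a pending
-- digit prefix it first completes the current digit run.
theorem pv_loop_eq (cs : List Char) :
    (∀ acc, zhongALoop cs "" false acc = acc ++ zhongBTok cs) ∧
    (∀ acc pref, zhongALoop cs (String.ofList pref) true acc =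
       acc ++ String.ofList (pref ++ cs.takeWhile PySem.Chars.isdigit)
           :: zhongBTok (cs.dropWhile PySem.Chars.isdigit)) := by
  induction cs with
  | nil =>
    refine ⟨fun acc => by simp [zhongALoop, zhongBTok], fun acc pref => by simp [zhongALoop, zhongBTok]⟩
  | cons c cs ih =>
    obtain ⟨ih1, ih2⟩ := ih
    constructor
    · intro acc
      by_cases h : PySem.Chars.isdigit c
      · have : ("" : String).push c = String.ofList [c] := by
          apply String.toList_inj.mp; simp
        simp only [zhongALoop, zhongBTok, h, if_pos, this, ih2]
        simp
      · simp [zhongALoop, zhongBTok, h, ih1]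
    · intro acc pref
      by_cases h : PySem.Chars.isdigit c
      · simp only [zhongALoop, h, if_pos, pv_mk_push, ih2, List.takeWhile_cons, List.dropWhile_cons]
        simp
      · simp only [zhongALoop, h, Bool.false_eq_true, if_false, if_true, List.takeWhile_cons,
          List.dropWhile_cons]
        rw [ih1]
        simp [h, zhongBTok]

-- ===== VERDICT (by name: the statement is the Claim_ definition above) =====
theorem zhongToList_spec : Claim_equal_zhongToList := by
  intro str _
  unfold Spec_zhongToList zhongToList zhongToList_alt
  exact (pv_loop_eq str.toList).1 []
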